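-- pv_equiv track=rewrite | github.com/Khyst/nana_arm_controller | sdk/dynamixel_lib/dynamixel_sdk.py | _p1_error_str
-- ===== SOURCE A (Python) =====
-- ERRBIT_VOLTAGE     = 1
--
-- ERRBIT_ANGLE       = 2
--
-- ERRBIT_OVERHEAT    = 4
--
-- ERRBIT_RANGE       = 8
--
-- ERRBIT_CHECKSUM    = 16
--
-- ERRBIT_OVERLOAD    = 32
--
-- ERRBIT_INSTRUCTION = 64
--
-- def _p1_error_str(error: int) -> str:
--     for bit, msg in [
--         (ERRBIT_VOLTAGE,     "[RxPacketError] Input voltage error!"),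
--         (ERRBIT_ANGLE,       "[RxPacketError] Angle limit error!"),
--         (ERRBIT_OVERHEAT,    "[RxPacketError] Overheat error!"),
--         (ERRBIT_RANGE,       "[RxPacketError] Out of range error!"),
--         (ERRBIT_CHECKSUM,    "[RxPacketError] Checksum error!"),
--         (ERRBIT_OVERLOAD,    "[RxPacketError] Overload error!"),
--         (ERRBIT_INSTRUCTION, "[RxPacketError] Instruction code error!"),
--     ]:
--         if error & bit:
--             return msg
--     return ""
-- ===== SOURCE B (Python) =====
-- _P1_ERR_MSGS = {
--     1:  "[RxPacketError] Input voltage error!",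
--     2:  "[RxPacketError] Angle limit error!",
--     4:  "[RxPacketError] Overheat error!",
--     8:  "[RxPacketError] Out of range error!",
--     16: "[RxPacketError] Checksum error!",
--     32: "[RxPacketError] Overload error!",
--     64: "[RxPacketError] Instruction code error!",
-- }
--
-- def _p1_error_str(error: int) -> str:
--     bits = error & 0x7F
--     return _P1_ERR_MSGS.get(bits & -bits, "")
-- ===== Notes on version B (the rewrite author's own statement) =====
-- stated objective: idiomatic
-- what changed: Replaces the ordered per-bit scan over (bit, message) pairs with a single bit manipulation: mask the input to the defined error bits, isolate the lowest set bit, and do one dict lookup with a default.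
import Mathlib
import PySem

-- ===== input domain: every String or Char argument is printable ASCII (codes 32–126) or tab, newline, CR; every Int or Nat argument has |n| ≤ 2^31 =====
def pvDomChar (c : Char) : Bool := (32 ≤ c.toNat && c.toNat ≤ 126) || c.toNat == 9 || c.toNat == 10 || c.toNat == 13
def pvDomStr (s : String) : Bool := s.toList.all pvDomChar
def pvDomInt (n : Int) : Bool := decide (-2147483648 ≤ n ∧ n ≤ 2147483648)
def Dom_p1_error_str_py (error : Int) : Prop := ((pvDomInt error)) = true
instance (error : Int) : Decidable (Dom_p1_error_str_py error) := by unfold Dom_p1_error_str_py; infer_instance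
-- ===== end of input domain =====

-- B replaces A's ordered scan over the 7 (bit, message) pairs by masking to the defined
-- bits, isolating the lowest set bit, and one dict lookup with a default (idiomatic).

-- ===== PORT A =====
-- the literal list A iterates over, in order
def p1ErrTable : List (Int × String) :=
  [(1,  "[RxPacketError] Input voltage error!"),
   (2,  "[RxPacketError] Angle limit error!"),
   (4,  "[RxPacketError] Overheat error!"),
   (8,  "[RxPacketError] Out of range error!"),
   (16, "[RxPacketError] Checksum error!"),
   (32, "[RxPacketError] Overload error!"),
   (64, "[RxPacketError] Instruction code error!")]

-- the for-loop with early return: 'if error & bit:' is int truthiness, i.e. ≠ 0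
def p1ErrLoop (error : Int) : List (Int × String) → String
  | [] => ""
  | (bit, msg) :: rest => if PySem.Int.band error bit ≠ 0 then msg else p1ErrLoop error rest

def p1_error_str_py (error : Int) : String := p1ErrLoop error p1ErrTable

-- ===== PORT B =====
def p1AltMsgs : PySem.Dict Int String :=
  PySem.Dict.ofList
    [(1,  "[RxPacketError] Input voltage error!"),
     (2,  "[RxPacketError] Angle limit error!"),
     (4,  "[RxPacketError] Overheat error!"),
     (8,  "[RxPacketError] Out of range error!"),
     (16, "[RxPacketError] Checksum error!"),
     (32, "[RxPacketError] Overload error!"),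
     (64, "[RxPacketError] Instruction code error!")]

def p1_error_str_py_alt (error : Int) : String :=
  let bits := PySem.Int.band error 127
  PySem.Dict.getD p1AltMsgs (PySem.Int.band bits (-bits)) ""

-- ===== PRECONDITION & SPEC =====
def Spec_p1_error_str_py (error : Int) (out : String) : Prop := out = p1_error_str_py_alt error
instance (error : Int) (out : String) : Decidable (Spec_p1_error_str_py error out) := by unfold Spec_p1_error_str_py; infer_instance

-- ===== CLAIM (what is proved, stated in full; the proofs are below) =====
def Claim_equal_p1_error_str_py : Prop := ∀ (error : Int), Dom_p1_error_str_py error → Spec_p1_error_str_py error (p1_error_str_py error)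

-- ===== LEMMAS AND PROOFS =====

-- low 7 bits of m determine m &&& v whenever v < 128
theorem pvLandMod (m v : Nat) (hv : v < 128) : m &&& v = (m % 128) &&& v := by
  apply Nat.eq_of_testBit_eq
  intro i
  rw [Nat.testBit_and, Nat.testBit_and]
  by_cases hi : i < 7
  · have h128 : (128 : Nat) = 2 ^ 7 := by norm_num
    rw [h128, Nat.testBit_mod_two_pow]
    simp [hi]
  · have hvi : v.testBit i = false := by
      apply Nat.testBit_eq_false_of_lt
      calc v < 128 := hv
        _ = 2 ^ 7 := by norm_num
        _ ≤ 2 ^ i := Nat.pow_le_pow_right (by norm_num) (by omega)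
    simp [hvi]

-- the two's-complement identity behind the negative case, finite so decidable
set_option maxRecDepth 10000 in
theorem pvLandCompl : ∀ t : Nat, t < 128 → ∀ v : Nat, v < 128 →
    v - (v &&& (127 - t)) = t &&& v := by
  decide

-- band with a small nonnegative mask only sees e's residue mod 128
theorem pvBandLow (e : Int) (v : Nat) (hv : v < 128) :
    PySem.Int.band e (↑v) = ↑((e % 128).toNat &&& v) := by
  by_cases he : 0 ≤ e
  · rw [PySem.Int.band_of_nonneg he (by positivity)]
    have h1 : ((v : Int)).toNat = v := Int.toNat_natCast v
    rw [h1, pvLandMod e.toNat v hv]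
    congr 2
    omega
  · rw [PySem.Int.band.eq_1, if_neg (by omega), if_pos (by positivity)]
    have h1 : ((v : Int)).toNat = v := Int.toNat_natCast v
    rw [h1]
    set m := (-e - 1).toNat with hm
    set t := (e % 128).toNat with ht
    have hmt : m % 128 = 127 - t := by omega
    have htlt : t < 128 := by omega
    rw [Nat.land_comm v m, pvLandMod m v hv, hmt, Nat.land_comm (127 - t) v,
        pvLandCompl t htlt v hv, Nat.land_comm t v]

-- both guards of A see only the residue
theorem pvBandLow' (e : Int) (v : Nat) (hv : v < 128) :
    PySem.Int.band e (↑v) = PySem.Int.band (↑((e % 128).toNat)) (↑v) := by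
  rw [pvBandLow e v hv, pvBandLow (↑((e % 128).toNat)) v hv]
  congr 2
  omega

theorem pvA_mod (e : Int) : p1_error_str_py e = p1_error_str_py (↑((e % 128).toNat)) := by
  have h1 := pvBandLow' e 1 (by norm_num)
  have h2 := pvBandLow' e 2 (by norm_num)
  have h4 := pvBandLow' e 4 (by norm_num)
  have h8 := pvBandLow' e 8 (by norm_num)
  have h16 := pvBandLow' e 16 (by norm_num)
  have h32 := pvBandLow' e 32 (by norm_num)
  have h64 := pvBandLow' e 64 (by norm_num)
  push_cast at h1 h2 h4 h8 h16 h32 h64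
  simp only [p1_error_str_py, p1ErrTable, p1ErrLoop, h1, h2, h4, h8, h16, h32, h64]

theorem pvB_mod (e : Int) : p1_error_str_py_alt e = p1_error_str_py_alt (↑((e % 128).toNat)) := by
  have h := pvBandLow' e 127 (by norm_num)
  push_cast at h
  simp only [p1_error_str_py_alt, h]

set_option maxRecDepth 10000 in
theorem pvResidues : ∀ t : Nat, t < 128 →
    p1_error_str_py (↑t) = p1_error_str_py_alt (↑t) := by decide

-- ===== VERDICT (by name: the statement is the Claim_ definition above) =====
theorem p1_error_str_py_spec : Claim_equal_p1_error_str_py := by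
  intro e _
  unfold Spec_p1_error_str_py
  rw [pvA_mod e, pvB_mod e]
  exact pvResidues (e % 128).toNat (by omega)
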